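-- pv_equiv track=rewrite | github.com/philipwastakenwastaken/url2ref | url2ref.py | find_attribute_values
-- ===== SOURCE A (Python) =====
-- def find_attribute_values(lookup_dict, json_data):
--     """Returns a list of values within the metadata for the attributes in the lookup dictionary.
--
--     Args:
--         lookup_dict: Dictionary of potential paths to attribute values within the metadata
--         data: Metadata dictionary in the format returned by extruct.extract(uniform=True)
--
--     Returns:
--         values: List of values retrieved from the metadata using the lookup dictionary
--     """
--     def collect_item(path, dic):
--         if (len(path) > 1):
--             return collect_item(path[1:], dic.get(path[0], {}))
--         if isinstance(dic, list): dic = dic[0]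
--         return dic.get(path[0])
--
--     def find_rec(json_data, attribute_path, values):
--         if isinstance(json_data, dict):
--             for key, value in json_data.items():
--                 if key == attribute_path[0]:
--                     if len(attribute_path) > 1:
--                         find_rec(json_data[key], attribute_path[1:], values)
--                     else: # Item can be retrieved
--                         if isinstance(value, list):
--                             for subitem in value:
--                                 if subitem not in values:
--                                     values.append(subitem)
--                         elif value not in values:
--                             values.append(value)
--                 elif isinstance(value, (dict, list)):
--                     find_rec(value, attribute_path, values)
--         elif isinstance(json_data, list):
--             for item in json_data:
--                 find_rec(item, attribute_path, values)
--
--     values = []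
--     for format, attribute_path in lookup_dict:
--         if json_data[format]:
--             find_rec(json_data, attribute_path, values)
--     return values
-- ===== SOURCE B (Python) =====
-- def find_attribute_values(lookup_dict, json_data):
--     """Iterative re-implementation: explicit-stack DFS instead of recursion.
--
--     Matched leaf values are scheduled as 'emit' frames on the same stack so
--     that append order is exactly the recursive pre-order."""
--     values = []
--     for format, attribute_path in lookup_dict:
--         if not json_data[format]:
--             continue
--         stack = [("walk", json_data, attribute_path)]
--         while stack:
--             tag, node, path = stack.pop()
--             if tag == "emit":
--                 if isinstance(node, list):
--                     for subitem in node: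
--                         if subitem not in values:
--                             values.append(subitem)
--                 elif node not in values:
--                     values.append(node)
--             elif isinstance(node, dict):
--                 frames = []
--                 for key, value in node.items():
--                     if key == path[0]:
--                         if len(path) > 1:
--                             frames.append(("walk", value, path[1:]))
--                         else:
--                             frames.append(("emit", value, path))
--                     elif isinstance(value, (dict, list)):
--                         frames.append(("walk", value, path))
--                 stack.extend(reversed(frames))
--             elif isinstance(node, list):
--                 stack.extend(("walk", item, path) for item in reversed(node))
--     return values
-- ===== Notes on version B (the rewrite author's own statement) =====
-- stated objective: alternative
-- what changed: The recursive find_rec is replaced by an iterative depth-first traversal over an explicit stack of frames, with matched leaf values scheduled as 'emit' frames (children pushed reversed) so the append/dedup order equals the recursive pre-order.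
-- outside the precondition, e.g. on find_attribute_values([('a', ['a'])], {'a': [{'x': '1'}]}): A returns [{'x': '1'}], B returns [{'x': '1'}]
import Mathlib
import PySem

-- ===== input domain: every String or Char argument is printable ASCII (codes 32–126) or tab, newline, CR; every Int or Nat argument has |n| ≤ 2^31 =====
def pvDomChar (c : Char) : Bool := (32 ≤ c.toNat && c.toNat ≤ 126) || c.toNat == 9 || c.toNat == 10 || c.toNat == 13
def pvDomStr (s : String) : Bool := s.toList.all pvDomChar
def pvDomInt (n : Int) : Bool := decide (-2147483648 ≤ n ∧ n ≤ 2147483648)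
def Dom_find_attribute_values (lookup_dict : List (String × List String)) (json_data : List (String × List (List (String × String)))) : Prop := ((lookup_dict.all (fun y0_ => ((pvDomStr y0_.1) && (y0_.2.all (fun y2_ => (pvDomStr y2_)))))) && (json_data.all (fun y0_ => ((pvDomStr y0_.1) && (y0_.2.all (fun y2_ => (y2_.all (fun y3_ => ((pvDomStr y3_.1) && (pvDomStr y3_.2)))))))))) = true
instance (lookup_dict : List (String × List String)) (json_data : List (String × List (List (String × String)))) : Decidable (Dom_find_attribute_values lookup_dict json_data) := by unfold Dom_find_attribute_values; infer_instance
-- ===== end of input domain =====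

-- B replaces the recursive traversal by an iterative explicit-stack DFS with 'emit' frames; same cost ("alternative").

-- ===== PORT A =====
-- Python `find_rec` is one heterogeneous recursion; under the fixed metadata shape
-- (dict -> list of dicts -> str) it is transliterated level by level.

-- find_rec on an inner metadata dict (whose values are strings)
def findRecInner (d : List (String × String)) (path : List String) (values : List String) : List String :=
  match path with
  | [] => values -- Python raises IndexError here; unreachable when the top-level path is nonempty
  | p0 :: rest =>
    (PySem.Dict.ofList d).items.foldl (fun vs kv =>
      if kv.1 = p0 then
        if rest ≠ [] then vs -- find_rec(d[key], path[1:]): a string is neither dict nor list, no branch fires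
        else if kv.2 ∈ vs then vs else vs ++ [kv.2] -- value not in values -> append
      else vs) -- elif isinstance(value,(dict,list)): a string is neither
      values

-- find_rec on a list of inner dicts
def findRecList (l : List (List (String × String))) (path : List String) (values : List String) : List String :=
  l.foldl (fun vs d => findRecInner d path vs) values

-- find_rec on the top-level dict (whose values are lists of dicts)
def findRecTop (jd : List (String × List (List (String × String)))) (path : List String) (values : List String) : List String :=
  match path with
  | [] => values -- Python raises IndexError here; Pre_ excludes it (reached only when the guard fired)
  | p0 :: rest =>
    (PySem.Dict.ofList jd).items.foldl (fun vs kv =>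
      if kv.1 = p0 then
        if rest ≠ [] then findRecList kv.2 rest vs -- json_data[key] is kv.2 (dict keys are unique)
        else vs -- Python appends the DICT elements of kv.2 (not strings); Pre_ excludes kv.2 ≠ []
      else findRecList kv.2 path vs) -- value is always a list here
      values

def find_attribute_values (lookup_dict : List (String × List String)) (json_data : List (String × List (List (String × String)))) : List String :=
  lookup_dict.foldl (fun vs p =>
    -- `json_data[format]` raises KeyError on a missing key; Pre_ requires the key, so getD is exact
    if (PySem.Dict.ofList json_data).getD p.1 [] ≠ [] then findRecTop json_data p.2 vs else vs) []

-- ===== PORT B =====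
-- Source B's stack frames: ("walk", node, path) for each node shape, plus ("emit", value, _).
inductive PvFrame where
  | top (jd : List (String × List (List (String × String)))) (path : List String)
  | lst (l : List (List (String × String))) (path : List String)
  | inner (d : List (String × String)) (path : List String)
  | wstr (s : String) -- a walk frame holding a plain string: neither dict nor list, no branch fires
  | emitS (s : String)
  | emitL (l : List (List (String × String))) -- emit of a list-of-dicts value; Pre_ excludes it nonempty
deriving Repr, DecidableEq

-- termination measure for the while-loop
def pvWeight : PvFrame → Nat
  | .top jd _ => 1 + ((PySem.Dict.ofList jd).items.map (fun kv => 1 + (kv.2.map (fun d => 1 + (PySem.Dict.ofList d).items.length)).sum)).sum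
  | .lst l _ => 1 + (l.map (fun d => 1 + (PySem.Dict.ofList d).items.length)).sum
  | .inner d _ => 1 + (PySem.Dict.ofList d).items.length
  | .wstr _ => 1
  | .emitS _ => 1
  | .emitL _ => 1

-- the `frames` list built while iterating an inner dict's items
def pvFramesInner (its : List (String × String)) (path : List String) : List PvFrame :=
  match path with
  | [] => [] -- Python raises IndexError on path[0]; unreachable under Pre_
  | p0 :: rest =>
    its.filterMap (fun kv =>
      if kv.1 = p0 then some (if rest ≠ [] then PvFrame.wstr kv.2 else PvFrame.emitS kv.2)
      else none) -- a string value is neither dict nor list: no frame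

-- the `frames` list built while iterating the top-level dict's items
def pvFramesTop (its : List (String × List (List (String × String)))) (path : List String) : List PvFrame :=
  match path with
  | [] => [] -- IndexError in Python; excluded by Pre_
  | p0 :: rest =>
    its.map (fun kv =>
      if kv.1 = p0 then (if rest ≠ [] then PvFrame.lst kv.2 rest else PvFrame.emitL kv.2)
      else PvFrame.lst kv.2 path)

-- facts the loop's termination proof cites
theorem pvFramesInner_wsum (its : List (String × String)) (path : List String) :
    ((pvFramesInner its path).map pvWeight).sum ≤ its.length := by
  match path with
  | [] => simp [pvFramesInner]
  | p0 :: rest =>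
    simp only [pvFramesInner]
    induction its with
    | nil => simp
    | cons kv t ih =>
      by_cases h : kv.1 = p0
      · have h1 : pvWeight (if rest ≠ [] then PvFrame.wstr kv.2 else PvFrame.emitS kv.2) = 1 := by
          split_ifs <;> rfl
        simp only [List.filterMap_cons, if_pos h, List.map_cons, List.sum_cons, List.length_cons, h1]
        omega
      · simp only [List.filterMap_cons, if_neg h, List.length_cons]
        omega

theorem pvFramesTop_wsum (its : List (String × List (List (String × String)))) (path : List String) :
    ((pvFramesTop its path).map pvWeight).sum
      ≤ (its.map (fun kv => 1 + (kv.2.map (fun d => 1 + (PySem.Dict.ofList d).items.length)).sum)).sum := by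
  match path with
  | [] => simp [pvFramesTop]
  | p0 :: rest =>
    simp only [pvFramesTop]
    induction its with
    | nil => simp
    | cons kv t ih =>
      simp only [List.map_cons, List.sum_cons]
      have h1 : pvWeight (if kv.1 = p0 then (if rest ≠ [] then PvFrame.lst kv.2 rest else PvFrame.emitL kv.2) else PvFrame.lst kv.2 (p0 :: rest))
          ≤ 1 + (kv.2.map (fun d => 1 + (PySem.Dict.ofList d).items.length)).sum := by
        split_ifs <;> simp [pvWeight]
      omega

theorem pvInner_wsum (l : List (List (String × String))) (path : List String) :
    ((l.map (fun d => PvFrame.inner d path)).map pvWeight).sum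
      = (l.map (fun d => 1 + (PySem.Dict.ofList d).items.length)).sum := by
  induction l with
  | nil => rfl
  | cons a t ih => simp only [List.map_cons, List.sum_cons, ih, pvWeight]

-- the `while stack:` loop; the stack head is the last-pushed frame, so `stack.extend(reversed(frames))`
-- followed by `pop` is modelled as prepending `frames` in order
def pvLoop : List PvFrame → List String → List String
  | [], vs => vs
  | .emitS s :: rest, vs => pvLoop rest (if s ∈ vs then vs else vs ++ [s])
  | .emitL _ :: rest, vs => pvLoop rest vs -- Python appends dicts when the list is nonempty; Pre_ excludes that
  | .wstr _ :: rest, vs => pvLoop rest vs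
  | .inner d path :: rest, vs => pvLoop (pvFramesInner (PySem.Dict.ofList d).items path ++ rest) vs
  | .lst l path :: rest, vs => pvLoop (l.map (fun d => PvFrame.inner d path) ++ rest) vs
  | .top jd path :: rest, vs => pvLoop (pvFramesTop (PySem.Dict.ofList jd).items path ++ rest) vs
termination_by s _ => (s.map pvWeight).sum
decreasing_by
  all_goals simp only [List.map_cons, List.sum_cons, List.map_append, List.sum_append, pvWeight]
  · omega
  · omega
  · omega
  · have := pvFramesInner_wsum (PySem.Dict.ofList d).items path; omega
  · have h0 : List.map (fun (x : {d // d ∈ l}) => PvFrame.inner x.1 path) l.attach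
        = List.map (fun d => PvFrame.inner d path) l := by simp
    rw [h0, pvInner_wsum]
    omega
  · have := pvFramesTop_wsum (PySem.Dict.ofList jd).items path; omega

def find_attribute_values_alt (lookup_dict : List (String × List String)) (json_data : List (String × List (List (String × String)))) : List String :=
  lookup_dict.foldl (fun vs p =>
    if (PySem.Dict.ofList json_data).getD p.1 [] ≠ [] then pvLoop [PvFrame.top json_data p.2] vs else vs) []

-- ===== PRECONDITION & SPEC =====
-- Pre_ excludes exactly: (a) a lookup format missing from json_data (Python: KeyError), (b) an empty
-- attribute path whose format guard fires (IndexError on path[0]), and (c) a length-1 path whose head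
-- names a top-level key with a NONEMPTY list while some guard fires — there Python A returns a list
-- containing dicts, which is not a value of the declared type list[str] (B returns the same in Python).
def Pre_find_attribute_values (lookup_dict : List (String × List String)) (json_data : List (String × List (List (String × String)))) : Prop :=
  ∀ p ∈ lookup_dict,
    ((PySem.Dict.ofList json_data).get? p.1).isSome = true ∧
    ((PySem.Dict.ofList json_data).getD p.1 [] ≠ [] →
      p.2 ≠ [] ∧ (p.2.length = 1 → (PySem.Dict.ofList json_data).getD p.2.headI [] = []))
instance (lookup_dict : List (String × List String)) (json_data : List (String × List (List (String × String)))) : Decidable (Pre_find_attribute_values lookup_dict json_data) := by unfold Pre_find_attribute_values; infer_instance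

def pvWitness_find_attribute_values : (List (String × List String)) × (List (String × List (List (String × String)))) :=
  ([("json-ld", ["json-ld", "name"])], [("json-ld", [[("name", "X"), ("url", "Y")]])])

def Spec_find_attribute_values (lookup_dict : List (String × List String)) (json_data : List (String × List (List (String × String)))) (out : List String) : Prop := out = find_attribute_values_alt lookup_dict json_data
instance (lookup_dict : List (String × List String)) (json_data : List (String × List (List (String × String)))) (out : List String) : Decidable (Spec_find_attribute_values lookup_dict json_data out) := by unfold Spec_find_attribute_values; infer_instance

-- ===== CLAIM (what is proved, stated in full; the proofs are below) =====
def Claim_equal_find_attribute_values : Prop := ∀ (lookup_dict : List (String × List String)) (json_data : List (String × List (List (String × String)))), Dom_find_attribute_values lookup_dict json_data → Pre_find_attribute_values lookup_dict json_data → Spec_find_attribute_values lookup_dict json_data (find_attribute_values lookup_dict json_data)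

-- ===== LEMMAS AND PROOFS =====

-- stack discipline: children of a frame are fully processed before the frames below it
theorem pvLoop_append (s1 s2 : List PvFrame) (vs : List String) :
    pvLoop (s1 ++ s2) vs = pvLoop s2 (pvLoop s1 vs) := by
  fun_induction pvLoop s1 vs with
  | case1 vs => simp
  | case2 s rest vs ih => simp only [List.cons_append, pvLoop]; exact ih
  | case3 l rest vs ih => simp only [List.cons_append, pvLoop]; exact ih
  | case4 s rest vs ih => simp only [List.cons_append, pvLoop]; exact ih
  | case5 d path rest vs ih =>
    simp only [List.cons_append, pvLoop, ← List.append_assoc]; exact ih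
  | case6 l path rest vs ih =>
    simp only [List.cons_append, pvLoop, ← List.append_assoc]
    simpa using ih
  | case7 jd path rest vs ih =>
    simp only [List.cons_append, pvLoop, ← List.append_assoc]; exact ih

theorem pvLoop_cons (f : PvFrame) (rest : List PvFrame) (vs : List String) :
    pvLoop (f :: rest) vs = pvLoop rest (pvLoop [f] vs) := by
  simpa using pvLoop_append [f] rest vs

-- the frames generated while scanning an inner dict behave like A's inner foldl
theorem pvLoop_framesInner (p0 : String) (rest : List String) (its : List (String × String)) (vs : List String) :
    pvLoop (pvFramesInner its (p0 :: rest)) vs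
      = its.foldl (fun vs kv =>
          if kv.1 = p0 then
            if rest ≠ [] then vs else if kv.2 ∈ vs then vs else vs ++ [kv.2]
          else vs) vs := by
  induction its generalizing vs with
  | nil => simp [pvFramesInner, pvLoop]
  | cons kv t ih =>
    simp only [pvFramesInner, List.filterMap_cons, List.foldl_cons] at *
    by_cases h : kv.1 = p0
    · rw [if_pos h, if_pos h]
      by_cases hr : rest ≠ []
      · rw [if_pos hr, if_pos hr]
        simp only [pvLoop]
        exact ih vs
      · rw [if_neg hr, if_neg hr]
        simp only [pvLoop]
        exact ih _
    · rw [if_neg h, if_neg h]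
      exact ih vs

theorem pvLoop_inner (d : List (String × String)) (path : List String) (vs : List String) :
    pvLoop [PvFrame.inner d path] vs = findRecInner d path vs := by
  cases path with
  | nil => simp [pvLoop, pvFramesInner, findRecInner]
  | cons p0 rest =>
    simp only [pvLoop, List.append_nil]
    rw [pvLoop_framesInner]
    rfl

theorem pvLoop_lst (l : List (List (String × String))) (path : List String) (vs : List String) :
    pvLoop [PvFrame.lst l path] vs = findRecList l path vs := by
  induction l generalizing vs with
  | nil => simp [pvLoop, findRecList]
  | cons d t ih =>
    rw [pvLoop, List.append_nil, List.map_cons, pvLoop_cons, pvLoop_inner]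
    have h2 : pvLoop (t.map (fun d => PvFrame.inner d path)) (findRecInner d path vs)
        = findRecList t path (findRecInner d path vs) := by
      rw [← ih, pvLoop, List.append_nil]
    rw [h2]
    rfl

-- the frames generated while scanning the top-level dict behave like A's top foldl
theorem pvLoop_framesTop (p0 : String) (rest : List String) (its : List (String × List (List (String × String)))) (vs : List String) :
    pvLoop (pvFramesTop its (p0 :: rest)) vs
      = its.foldl (fun vs kv =>
          if kv.1 = p0 then
            if rest ≠ [] then findRecList kv.2 rest vs else vs
          else findRecList kv.2 (p0 :: rest) vs) vs := by
  induction its generalizing vs with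
  | nil => simp [pvFramesTop, pvLoop]
  | cons kv t ih =>
    simp only [pvFramesTop, List.map_cons, List.foldl_cons] at *
    rw [pvLoop_cons]
    by_cases h : kv.1 = p0
    · rw [if_pos h, if_pos h]
      by_cases hr : rest ≠ []
      · rw [if_pos hr, if_pos hr, pvLoop_lst]
        exact ih _
      · rw [if_neg hr, if_neg hr]
        have : pvLoop [PvFrame.emitL kv.2] vs = vs := by simp [pvLoop]
        rw [this]
        exact ih vs
    · rw [if_neg h, if_neg h, pvLoop_lst]
      exact ih _

theorem pvLoop_top (jd : List (String × List (List (String × String)))) (path : List String) (vs : List String) :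
    pvLoop [PvFrame.top jd path] vs = findRecTop jd path vs := by
  cases path with
  | nil => simp [pvLoop, pvFramesTop, findRecTop]
  | cons p0 rest =>
    simp only [pvLoop, List.append_nil]
    rw [pvLoop_framesTop]
    rfl

-- ===== VERDICT (by name: the statement is the Claim_ definition above) =====
theorem find_attribute_values_spec : Claim_equal_find_attribute_values := by
  intro lookup_dict json_data _ _
  unfold Spec_find_attribute_values
  simp only [find_attribute_values, find_attribute_values_alt, pvLoop_top]
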